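-- pv_equiv track=rewrite | github.com/bica-tools/reticulate | reticulate/tutte.py | _expand_binomial
-- ===== SOURCE A (Python) =====
-- def _expand_binomial(exp: int) -> dict[int, int]:
--     """Expand (x - 1)^exp as a polynomial in x.
--
--     Returns {power: coefficient} for (x-1)^exp = sum C(exp,k) x^k (-1)^{exp-k}.
--     """
--     if exp < 0:
--         return {0: 1}
--     coeffs: dict[int, int] = {}
--     for k in range(exp + 1):
--         c = _comb(exp, k) * ((-1) ** (exp - k))
--         if c != 0:
--             coeffs[k] = c
--     return coeffs
--
-- def _comb(n: int, k: int) -> int: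
--     """Binomial coefficient C(n, k)."""
--     if k < 0 or k > n:
--         return 0
--     if k == 0 or k == n:
--         return 1
--     result = 1
--     for i in range(min(k, n - k)):
--         result = result * (n - i) // (i + 1)
--     return result
-- ===== SOURCE B (Python) =====
-- def _expand_binomial(exp: int) -> dict[int, int]:
--     """Expand (x - 1)^exp as {power: coefficient}, updating the binomial
--     coefficient incrementally in one pass (C(n,k) = C(n,k-1)*(n-k+1)//k)."""
--     if exp < 0:
--         return {0: 1}
--     s = -1 if exp % 2 else 1
--     b = 1
--     out = {0: s}
--     for k in range(1, exp + 1):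
--         b = b * (exp - k + 1) // k
--         s = -s
--         out[k] = s * b
--     return out
-- ===== Notes on version B (the rewrite author's own statement) =====
-- stated objective: faster
-- what changed: Instead of recomputing C(exp,k) from scratch with an inner product loop for every k, B updates the binomial coefficient incrementally (C(n,k)=C(n,k-1)*(n-k+1)//k) and flips the sign each step, in one pass.
import Mathlib
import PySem

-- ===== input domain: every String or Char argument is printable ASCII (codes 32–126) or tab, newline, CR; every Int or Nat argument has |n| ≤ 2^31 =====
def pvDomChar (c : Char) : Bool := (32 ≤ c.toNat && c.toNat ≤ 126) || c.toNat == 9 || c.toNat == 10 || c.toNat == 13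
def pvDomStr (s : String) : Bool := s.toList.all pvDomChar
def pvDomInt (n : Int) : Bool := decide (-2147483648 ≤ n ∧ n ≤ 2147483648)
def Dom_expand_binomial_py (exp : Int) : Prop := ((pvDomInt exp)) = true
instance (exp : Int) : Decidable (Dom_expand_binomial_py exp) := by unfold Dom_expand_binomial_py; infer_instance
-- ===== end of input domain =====

-- B replaces the per-k recomputation of C(exp,k) by an incremental one-pass
-- update C(n,k) = C(n,k-1)*(n-k+1)//k with a flipping sign (objective: faster).

-- ===== PORT A =====
-- port of _comb
def comb_py (n k : Int) : Int :=
  if k < 0 ∨ k > n then 0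
  else if k = 0 ∨ k = n then 1
  else (PySem.List.pyRange 0 (min k (n - k))).foldl
    (fun result i => PySem.Int.floordiv (result * (n - i)) (i + 1)) 1

def expand_binomial_py (exp : Int) : List (Int × Int) :=
  if exp < 0 then [(0, 1)]
  else
    ((PySem.List.pyRange 0 (exp + 1)).foldl
      (fun (coeffs : PySem.Dict Int Int) k =>
        let c := comb_py exp k * (-1) ^ (exp - k).toNat
        if c ≠ 0 then coeffs.insert k c else coeffs)
      PySem.Dict.empty).items

-- ===== PORT B =====
def expand_binomial_py_alt (exp : Int) : List (Int × Int) :=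
  if exp < 0 then [(0, 1)]
  else
    let s0 : Int := if PySem.Int.mod exp 2 ≠ 0 then -1 else 1
    ((PySem.List.pyRange 1 (exp + 1)).foldl
      (fun (st : Int × Int × PySem.Dict Int Int) k =>
        let b := PySem.Int.floordiv (st.1 * (exp - k + 1)) k
        let s := -st.2.1
        (b, s, st.2.2.insert k (s * b)))
      (1, s0, PySem.Dict.empty.insert 0 s0)).2.2.items

-- ===== PRECONDITION & SPEC =====
def Spec_expand_binomial_py (exp : Int) (out : List (Int × Int)) : Prop := out = expand_binomial_py_alt exp
instance (exp : Int) (out : List (Int × Int)) : Decidable (Spec_expand_binomial_py exp out) := by unfold Spec_expand_binomial_py; infer_instance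

-- ===== CLAIM (what is proved, stated in full; the proofs are below) =====
def Claim_equal_expand_binomial_py : Prop := ∀ (exp : Int), Dom_expand_binomial_py exp → Spec_expand_binomial_py exp (expand_binomial_py exp)

-- ===== LEMMAS AND PROOFS =====

-- signed coefficient of x^k in (x-1)^n
def pvCoef (n k : Nat) : Int := ((-1 : Int)) ^ (n - k) * (n.choose k : Int)

def pvItems (n : Nat) : List (Int × Int) :=
  (List.range (n + 1)).map (fun k : Nat => ((k : Int), pvCoef n k))

-- the shared exact-division step: C(n,m)*(n-m) // (m+1) = C(n,m+1)
lemma pvStep (n m : Nat) (h : m < n) :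
    PySem.Int.floordiv ((n.choose m : Int) * ((n : Int) - (m : Int))) ((m : Int) + 1)
      = (n.choose (m + 1) : Int) := by
  have hcast : ((n : Int) - (m : Int)) = ((n - m : Nat) : Int) := by
    push_cast [Nat.cast_sub h.le]; ring
  rw [hcast, PySem.Int.floordiv_eq_ediv_of_pos (by positivity)]
  have := Nat.choose_succ_right_eq n m
  have : ((n.choose m * (n - m) : Nat) : Int) = ((n.choose (m+1) : Nat) : Int) * ((m : Int) + 1) := by
    rw [← this]; push_cast; ring
  rw [show ((n.choose m : Int) * ((n - m : Nat) : Int)) = ((n.choose m * (n - m) : Nat) : Int) by push_cast; ring, this]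
  rw [Int.mul_ediv_cancel _ (by positivity)]

-- A's inner product loop computes C(n,m)
lemma pvComb_loop (n m : Nat) (h : m ≤ n) :
    (PySem.List.pyRange 0 (m : Int)).foldl
      (fun result i => PySem.Int.floordiv (result * ((n : Int) - i)) (i + 1)) 1
      = (n.choose m : Int) := by
  induction m with
  | zero => simp [PySem.List.pyRange_one_eq_nil]
  | succ m ih =>
    rw [show ((m + 1 : Nat) : Int) = (m : Int) + 1 by push_cast; ring,
        PySem.List.pyRange_one_succ_right (by positivity), List.foldl_append,
        ih (by omega)]
    simpa using pvStep n m (by omega)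

lemma pvComb_eq (n k : Nat) : comb_py (n : Int) (k : Int) = (n.choose k : Int) := by
  unfold comb_py
  by_cases hk : k ≤ n
  · rcases eq_or_ne k 0 with rfl | h0
    · simp
    · rcases eq_or_ne k n with rfl | hn
      · simp
      · have hlt : k < n := lt_of_le_of_ne hk hn
        rw [if_neg (by omega), if_neg (by omega)]
        have hmin : min (k : Int) ((n : Int) - (k : Int)) = ((min k (n - k) : Nat) : Int) := by
          push_cast [Nat.cast_sub hk]; omega
        rw [hmin, pvComb_loop n _ (by omega)]
        rcases le_total k (n - k) with hle | hge
        · rw [min_eq_left hle]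
        · rw [min_eq_right hge, Nat.choose_symm hk]
  · rw [if_pos (by omega), Nat.choose_eq_zero_of_lt (by omega)]
    simp

-- A's port returns pvItems
lemma pvA_eq (n : Nat) : expand_binomial_py (n : Int) = pvItems n := by
  unfold expand_binomial_py
  rw [if_neg (by omega)]
  rw [PySem.List.foldl_congr_mem _ _
      (fun (coeffs : PySem.Dict Int Int) k =>
        coeffs.insert k (comb_py (n : Int) k * (-1) ^ ((n : Int) - k).toNat)) _
      (by
        intro acc x hx
        have hx' := (PySem.List.mem_pyRange_one).mp hx
        obtain ⟨k, hk, rfl⟩ : ∃ k : Nat, k ≤ n ∧ x = (k : Int) := ⟨x.toNat, by omega, by omega⟩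
        simp only [pvComb_eq n k, show (((n : Int) - (k : Int)).toNat) = n - k by omega]
        rw [if_pos (mul_ne_zero (by exact_mod_cast (Nat.choose_pos hk).ne')
            (pow_ne_zero _ (by norm_num)))])]
  rw [PySem.Dict.items_foldl_insert_fresh _ _ _ _
      (by intro a _; simp [PySem.Dict.contains_empty])
      (by simpa using PySem.List.nodup_pyRange_one 0 ((n : Int) + 1))]
  rw [show ((n : Int) + 1) = ((n + 1 : Nat) : Int) by push_cast; ring,
      PySem.List.pyRange_zero_nat, List.map_map]
  unfold pvItems
  simp only [PySem.Dict.empty]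
  apply List.map_congr_left
  intro k hk
  have hk' : k ≤ n := by simpa [Nat.lt_succ_iff] using List.mem_range.mp hk
  simp only [Function.comp]
  rw [pvComb_eq, show (((n : Int) - (k : Int)).toNat) = n - k by omega]
  unfold pvCoef
  exact Prod.ext rfl (mul_comm _ _)

-- B's loop invariant
lemma pvB_loop (n j : Nat) (h : j ≤ n) :
    (PySem.List.pyRange 1 ((j : Int) + 1)).foldl
      (fun (st : Int × Int × PySem.Dict Int Int) k =>
        let b := PySem.Int.floordiv (st.1 * ((n : Int) - k + 1)) k
        let s := -st.2.1
        (b, s, st.2.2.insert k (s * b)))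
      (1, (-1 : Int) ^ n, PySem.Dict.empty.insert 0 ((-1 : Int) ^ n))
    = ((n.choose j : Int), (-1 : Int) ^ (n - j),
        PySem.Dict.mk ((List.range (j + 1)).map (fun k : Nat => ((k : Int), pvCoef n k)))) := by
  induction j with
  | zero =>
    rw [show ((0 : Nat) : Int) + 1 = 1 by norm_num,
        PySem.List.pyRange_one_eq_nil (by omega), List.foldl_nil]
    refine Prod.ext (by simp) (Prod.ext (by simp) ?_)
    apply PySem.Dict.ext
    rw [PySem.Dict.items_insert_of_not_contains _ _ (PySem.Dict.contains_empty 0)]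
    simp [pvCoef, PySem.Dict.empty]
  | succ j ih =>
    rw [show ((j + 1 : Nat) : Int) + 1 = ((j : Int) + 1) + 1 by push_cast; ring,
        PySem.List.pyRange_one_succ_right (by omega), List.foldl_append,
        ih (by omega), List.foldl_cons, List.foldl_nil]
    have hb : PySem.Int.floordiv ((n.choose j : Int) * ((n : Int) - ((j : Int) + 1) + 1)) ((j : Int) + 1)
        = (n.choose (j + 1) : Int) := by
      rw [show ((n : Int) - ((j : Int) + 1) + 1) = (n : Int) - (j : Int) by ring]
      exact pvStep n j (by omega)
    have hs : -((-1 : Int) ^ (n - j)) = (-1 : Int) ^ (n - (j + 1)) := by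
      rw [show n - j = (n - (j + 1)) + 1 by omega, pow_succ]
      ring
    refine Prod.ext (by simpa using hb) (Prod.ext (by simpa using hs) ?_)
    apply PySem.Dict.ext
    rw [PySem.Dict.items_insert_of_not_contains _ _ (by
      rw [PySem.Dict.contains_mk]
      rw [List.any_eq_false]
      intro p hp
      obtain ⟨k, hk, rfl⟩ := List.mem_map.mp hp
      have hkj := List.mem_range.mp hk
      simp only [beq_iff_eq]
      omega)]
    simp only []
    rw [List.range_succ (n := j + 1), List.map_append]
    congr 1
    simp only [List.map_cons, List.map_nil, List.cons.injEq, and_true]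
    refine Prod.ext (by push_cast; ring) ?_
    simp only [pvCoef]
    rw [hb, hs]

lemma pvB_eq (n : Nat) : expand_binomial_py_alt (n : Int) = pvItems n := by
  unfold expand_binomial_py_alt
  rw [if_neg (by omega)]
  have hs0 : (if PySem.Int.mod (n : Int) 2 ≠ 0 then (-1 : Int) else 1) = (-1 : Int) ^ n := by
    rw [show ((2 : Int)) = ((2 : Nat) : Int) by norm_num, PySem.Int.mod_natCast]
    rcases Nat.even_or_odd n with he | ho
    · rw [if_neg (by simp [Nat.even_iff.mp he]), he.neg_one_pow]
    · rw [if_pos (by simp [Nat.odd_iff.mp ho]), ho.neg_one_pow]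
  simp only [hs0]
  rw [pvB_loop n n le_rfl]
  rfl

-- ===== VERDICT (by name: the statement is the Claim_ definition above) =====
theorem expand_binomial_py_spec : Claim_equal_expand_binomial_py := by
  intro exp _
  unfold Spec_expand_binomial_py
  by_cases h : exp < 0
  · unfold expand_binomial_py expand_binomial_py_alt
    rw [if_pos h, if_pos h]
  · obtain ⟨n, rfl⟩ : ∃ n : Nat, exp = (n : Int) := ⟨exp.toNat, by omega⟩
    rw [pvA_eq, pvB_eq]
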